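-- pv_equiv track=rewrite | github.com/Fondamenti18/fondamenti-di-programmazione | students/1806343/homework01/program03.py | creaAccoppiamenti
-- ===== SOURCE A (Python) =====
-- import string
--
-- def isBetween_az(letter):
--     return letter in string.ascii_lowercase
--
-- def creaAccoppiamenti(chiave):
--     disordinati = list(chiave)
--
--     C = []
--     i = 0
--     while i < len(disordinati):
--         elemento = disordinati[i]
--         if isBetween_az(elemento):
--             if elemento not in C:
--                 C.append(elemento)
--         else:
--             del disordinati[i]
--             i -= 1
--         i += 1
--
--     for c in C:
--         cInChiave = chiave.count(c)
--         for i in range(cInChiave - 1):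
--             disordinati.remove(c)
--     ordinati = sorted(disordinati)
--     return dict(zip(ordinati, disordinati))
-- ===== SOURCE B (Python) =====
-- import string
--
-- def creaAccoppiamenti(chiave):
--     # One reversed pass collects each lowercase letter once, at its LAST
--     # occurrence (first seen while scanning backwards); no quadratic removals.
--     seen = set()
--     vals = []
--     for ch in reversed(chiave):
--         if ch in string.ascii_lowercase and ch not in seen:
--             seen.add(ch)
--             vals.append(ch)
--     vals.reverse()
--     return dict(zip(sorted(vals), vals))
-- ===== Notes on version B (the rewrite author's own statement) =====
-- stated objective: faster
-- what changed: A's quadratic while-loop with in-place deletions plus per-letter repeated list.remove passes is replaced by a single reversed scan that collects each lowercase letter once at its last occurrence (set membership), then one sort of the at-most-26 distinct letters.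
import Mathlib
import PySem

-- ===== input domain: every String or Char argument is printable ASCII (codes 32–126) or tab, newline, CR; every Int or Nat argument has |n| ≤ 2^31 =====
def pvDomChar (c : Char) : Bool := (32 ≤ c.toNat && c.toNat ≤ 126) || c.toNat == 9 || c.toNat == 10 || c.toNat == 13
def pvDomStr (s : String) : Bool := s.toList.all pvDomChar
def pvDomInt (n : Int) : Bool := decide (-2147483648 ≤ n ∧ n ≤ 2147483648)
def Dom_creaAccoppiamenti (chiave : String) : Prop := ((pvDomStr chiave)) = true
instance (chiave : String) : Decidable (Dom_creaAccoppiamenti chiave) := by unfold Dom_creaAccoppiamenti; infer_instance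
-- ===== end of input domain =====

-- B replaces A's quadratic while-loop + repeated list.remove passes by ONE reversed scan that
-- collects each lowercase letter at its last occurrence (objective: faster, asymptotic).

-- ===== PORT A =====

def pvAsciiLowercase : List Char := "abcdefghijklmnopqrstuvwxyz".toList

-- 'letter in string.ascii_lowercase': substring test on a length-1 string = character membership; exact
def isBetween_az (letter : Char) : Bool := pvAsciiLowercase.contains letter

-- A's while loop over (disordinati, C, i).  In the del-branch Python does 'i -= 1' and then the
-- common 'i += 1', so i is unchanged (and i is never negative): ported with the same i.
def pvWhileA (dis C : List Char) (i : Nat) : List Char × List Char :=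
  if h : i < dis.length then
    let elemento := dis[i]
    if isBetween_az elemento then
      pvWhileA dis (if C.contains elemento then C else C ++ [elemento]) (i + 1)
    else
      pvWhileA (dis.eraseIdx i) C i
  else (dis, C)
termination_by dis.length - i
decreasing_by
  · omega
  · simp [List.length_eraseIdx, h]; omega

-- 'for i in range(cnt - 1): disordinati.remove(c)'; Python's remove raises ValueError when c is
-- absent — unreachable here, so the getD leaves the list unchanged on that dead branch.
def pvRemoveTimes (n : Nat) (c : Char) (l : List Char) : List Char :=
  match n with
  | 0 => l
  | n + 1 => pvRemoveTimes n c ((PySem.List.remove? l c).getD l)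

def creaAccoppiamenti (chiave : String) : List (String × String) :=
  let r := pvWhileA chiave.toList [] 0
  -- chiave.count(c) for a single character c: substring count = character count; exact
  let disordinati := r.2.foldl
    (fun dis c => pvRemoveTimes (PySem.List.count chiave.toList c - 1) c dis) r.1
  let ordinati := PySem.List.sorted disordinati (fun x => x) false
  ((PySem.Dict.ofList (ordinati.zip disordinati)).items).map
    (fun kv => (String.mk [kv.1], String.mk [kv.2]))

-- ===== PORT B =====

-- Source B's loop body: ch in string.ascii_lowercase (same test as A's helper) and ch not in seen
def pvBStep (st : PySem.Set Char × List Char) (ch : Char) : PySem.Set Char × List Char :=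
  if isBetween_az ch && !(PySem.Set.contains st.1 ch) then
    (PySem.Set.add st.1 ch, st.2 ++ [ch])
  else st

def creaAccoppiamenti_alt (chiave : String) : List (String × String) :=
  let st := chiave.toList.reverse.foldl pvBStep (PySem.Set.empty, [])
  let vals := st.2.reverse
  ((PySem.Dict.ofList ((PySem.List.sorted vals (fun x => x) false).zip vals)).items).map
    (fun kv => (String.mk [kv.1], String.mk [kv.2]))

-- ===== PRECONDITION & SPEC =====
def Spec_creaAccoppiamenti (chiave : String) (out : List (String × String)) : Prop := out = creaAccoppiamenti_alt chiave
instance (chiave : String) (out : List (String × String)) : Decidable (Spec_creaAccoppiamenti chiave out) := by unfold Spec_creaAccoppiamenti; infer_instance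

-- ===== CLAIM (what is proved, stated in full; the proofs are below) =====
def Claim_equal_creaAccoppiamenti : Prop := ∀ (chiave : String), Dom_creaAccoppiamenti chiave → Spec_creaAccoppiamenti chiave (creaAccoppiamenti chiave)

-- ===== LEMMAS AND PROOFS =====

-- the accumulator step for A's C list
def pvStepC (C : List Char) (x : Char) : List Char := if C.contains x then C else C ++ [x]

theorem pvWhileA_spec (todo : List Char) : ∀ (done C : List Char),
    pvWhileA (done ++ todo) C done.length =
      (done ++ todo.filter isBetween_az, (todo.filter isBetween_az).foldl pvStepC C) := by
  induction todo with
  | nil => intro done C; rw [pvWhileA]; simp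
  | cons x t ih =>
    intro done C
    rw [pvWhileA]
    have hlt : done.length < (done ++ x :: t).length := by simp
    have hget : (done ++ x :: t)[done.length]'hlt = x := by
      simp [List.getElem_append_right (Nat.le_refl done.length)]
    rw [dif_pos hlt]
    simp only [hget]
    by_cases hp : isBetween_az x
    · rw [if_pos hp]
      have h1 : done ++ x :: t = (done ++ [x]) ++ t := by simp
      have h2 : done.length + 1 = (done ++ [x]).length := by simp
      rw [h1, h2, ih (done ++ [x])]
      simp [hp, List.foldl_cons, pvStepC]
    · rw [if_neg hp]
      have herase : (done ++ x :: t).eraseIdx done.length = done ++ t := by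
        rw [List.eraseIdx_append_of_length_le (Nat.le_refl _)]; simp
      rw [herase, ih done]
      simp [hp]

theorem pvMem_foldl_stepC (xs : List Char) : ∀ (C : List Char) (a : Char),
    a ∈ xs.foldl pvStepC C ↔ a ∈ C ∨ a ∈ xs := by
  induction xs with
  | nil => simp
  | cons x t ih =>
    intro C a
    simp only [List.foldl_cons, ih, pvStepC]
    by_cases hx : C.contains x
    · simp only [if_pos hx]
      constructor
      · rintro (h | h) <;> simp [h]
      · rintro (h | h)
        · exact Or.inl h
        · rcases List.mem_cons.mp h with h | h
          · exact Or.inl (by simpa [h] using List.contains_iff_mem.mp hx)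
          · exact Or.inr h
    · simp only [if_neg hx, List.mem_append, List.mem_cons]
      tauto
  

theorem pvNodup_foldl_stepC (xs : List Char) : ∀ (C : List Char), C.Nodup → (xs.foldl pvStepC C).Nodup := by
  induction xs with
  | nil => intro C h; exact h
  | cons x t ih =>
    intro C hC
    simp only [List.foldl_cons, pvStepC]
    by_cases hx : C.contains x
    · rw [if_pos hx]; exact ih C hC
    · rw [if_neg hx]
      refine ih _ ?_
      have hxC : x ∉ C := fun hmem => hx (List.contains_iff_mem.mpr hmem)
      simp [List.nodup_append, hC]
      intro a ha he
      exact hxC (he ▸ ha)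

-- keep only the last occurrence of c
def pvDbl (c : Char) : List Char → List Char
  | [] => []
  | x :: xs => if x = c ∧ c ∈ xs then pvDbl c xs else x :: pvDbl c xs

theorem pvDbl_of_not_mem {c : Char} : ∀ {l : List Char}, c ∉ l → pvDbl c l = l := by
  intro l
  induction l with
  | nil => intro _; rfl
  | cons x xs ih =>
    intro h
    have hx : ¬(x = c ∧ c ∈ xs) := by
      rintro ⟨rfl, hc⟩; exact h (List.mem_cons_of_mem _ hc)
    rw [pvDbl, if_neg hx, ih (fun hc => h (List.mem_cons_of_mem _ hc))]

theorem pvRemoveTimes_cons_ne (n : Nat) (c x : Char) (hx : x ≠ c) : ∀ (l : List Char),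
    pvRemoveTimes n c (x :: l) = x :: pvRemoveTimes n c l := by
  induction n with
  | zero => intro l; rfl
  | succ n ih =>
    intro l
    have hstep : ((PySem.List.remove? (x :: l) c).getD (x :: l)) = x :: (PySem.List.remove? l c).getD l := by
      rw [PySem.List.remove?_cons_of_ne l hx]
      cases PySem.List.remove? l c <;> simp
    rw [pvRemoveTimes, hstep, ih, pvRemoveTimes]

theorem pvRemoveTimes_count (c : Char) : ∀ (l : List Char),
    pvRemoveTimes (l.count c - 1) c l = pvDbl c l := by
  intro l
  induction l with
  | nil => rfl
  | cons x xs ih =>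
    by_cases hx : x = c
    · subst hx
      rw [List.count_cons_self]
      by_cases hc : x ∈ xs
      · have hpos : 0 < xs.count x := List.count_pos_iff.mpr hc
        obtain ⟨m, hm⟩ : ∃ m, xs.count x = m + 1 := ⟨xs.count x - 1, by omega⟩
        have : xs.count x + 1 - 1 = m + 1 := by omega
        rw [this, pvRemoveTimes]
        have : (PySem.List.remove? (x :: xs) x).getD (x :: xs) = xs := by simp
        rw [this]
        have : m = xs.count x - 1 := by omega
        rw [this, ih, pvDbl, if_pos ⟨rfl, hc⟩]
      · have : xs.count x = 0 := List.count_eq_zero.mpr hc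
        rw [this]
        have h0 : (0 : Nat) + 1 - 1 = 0 := rfl
        rw [h0, pvRemoveTimes, pvDbl, if_neg (by simp [hc]), pvDbl_of_not_mem hc]
    · rw [List.count_cons_of_ne hx, pvRemoveTimes_cons_ne _ _ _ hx, ih, pvDbl,
        if_neg (by tauto)]


-- keep, for letters in S, only the last occurrence
def pvKeepOn (S : List Char) : List Char → List Char
  | [] => []
  | x :: xs => if x ∈ S ∧ x ∈ xs then pvKeepOn S xs else x :: pvKeepOn S xs

theorem pvKeepOn_nil_left : ∀ (M : List Char), pvKeepOn [] M = M := by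
  intro M
  induction M with
  | nil => rfl
  | cons x xs ih => rw [pvKeepOn, if_neg (by simp), ih]

theorem pvMem_keepOn (S : List Char) : ∀ (M : List Char) (a : Char), a ∈ pvKeepOn S M ↔ a ∈ M := by
  intro M
  induction M with
  | nil => simp [pvKeepOn]
  | cons x xs ih =>
    intro a
    rw [pvKeepOn]
    split_ifs with h
    · rw [ih, List.mem_cons]
      constructor
      · exact Or.inr
      · rintro (rfl | ha)
        · exact h.2
        · exact ha
    · simp [ih]

theorem pvCount_keepOn (S : List Char) (c : Char) (hc : c ∉ S) : ∀ (M : List Char),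
    (pvKeepOn S M).count c = M.count c := by
  intro M
  induction M with
  | nil => rfl
  | cons x xs ih =>
    rw [pvKeepOn]
    split_ifs with h
    · have hx : x ≠ c := fun he => hc (he ▸ h.1)
      rw [ih, List.count_cons_of_ne hx]
    · rw [List.count_cons, List.count_cons, ih]

theorem pvDbl_keepOn (c : Char) (S : List Char) : ∀ (M : List Char),
    pvDbl c (pvKeepOn S M) = pvKeepOn (S ++ [c]) M := by
  intro M
  induction M with
  | nil => rfl
  | cons x xs ih =>
    rw [pvKeepOn, pvKeepOn]
    by_cases h1 : x ∈ S ∧ x ∈ xs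
    · rw [if_pos h1, if_pos ⟨List.mem_append_left _ h1.1, h1.2⟩, ih]
    · rw [if_neg h1]
      by_cases h2 : x = c ∧ c ∈ pvKeepOn S xs
      · have hcxs : c ∈ xs := (pvMem_keepOn S xs c).mp h2.2
        rw [pvDbl, if_pos ⟨h2.1, h2.2⟩, ih,
          if_pos ⟨by simp [h2.1], h2.1 ▸ hcxs⟩]
      · have hcond : ¬(x ∈ S ++ [c] ∧ x ∈ xs) := by
          rintro ⟨hmem, hxs⟩
          rcases List.mem_append.mp hmem with hS | hc
          · exact h1 ⟨hS, hxs⟩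
          · have hxc : x = c := by simpa using hc
            exact h2 ⟨hxc, (pvMem_keepOn S xs c).mpr (hxc ▸ hxs)⟩
        rw [pvDbl, if_neg h2, ih, if_neg hcond]

theorem pvPhase2_fold (L : List Char) : ∀ (D S : List Char), D.Nodup → (∀ c ∈ D, c ∉ S) →
    D.foldl (fun M c => pvRemoveTimes (L.count c - 1) c M) (pvKeepOn S L) = pvKeepOn (S ++ D) L := by
  intro D
  induction D with
  | nil => intro S _ _; simp
  | cons c D' ih =>
    intro S hnd hdisj
    rw [List.foldl_cons]
    have hcS : c ∉ S := hdisj c (List.mem_cons_self)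
    have hstep : pvRemoveTimes (L.count c - 1) c (pvKeepOn S L) = pvKeepOn (S ++ [c]) L := by
      rw [← pvCount_keepOn S c hcS L, pvRemoveTimes_count, pvDbl_keepOn]
    rw [hstep]
    have hnd' : D'.Nodup := hnd.of_cons
    have hdisj' : ∀ d ∈ D', d ∉ S ++ [c] := by
      intro d hd hmem
      rcases List.mem_append.mp hmem with hS | hc
      · exact hdisj d (List.mem_cons_of_mem _ hd) hS
      · have : d = c := by simpa using hc
        exact (List.nodup_cons.mp hnd).1 (this ▸ hd)
    rw [ih (S ++ [c]) hnd' hdisj']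
    simp

-- first occurrences, scanning left to right, skipping already seen
def pvFdu : List Char → List Char → List Char
  | _, [] => []
  | seen, x :: xs => if x ∈ seen then pvFdu seen xs else x :: pvFdu (x :: seen) xs

theorem pvFdu_congr_seen : ∀ (N s₁ s₂ : List Char), (∀ a, a ∈ s₁ ↔ a ∈ s₂) →
    pvFdu s₁ N = pvFdu s₂ N := by
  intro N
  induction N with
  | nil => intro _ _ _; rfl
  | cons x xs ih =>
    intro s₁ s₂ h
    rw [pvFdu, pvFdu]
    by_cases hx : x ∈ s₁
    · rw [if_pos hx, if_pos ((h x).mp hx), ih s₁ s₂ h]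
    · rw [if_neg hx, if_neg (fun hm => hx ((h x).mpr hm)),
        ih (x :: s₁) (x :: s₂) (fun a => by simp [h a])]

theorem pvFdu_seen_filter : ∀ (N seen : List Char) (x : Char),
    pvFdu (x :: seen) N = pvFdu seen (N.filter (· ≠ x)) := by
  intro N
  induction N with
  | nil => intro _ _; rfl
  | cons a N' ih =>
    intro seen x
    by_cases hax : a = x
    · subst hax
      rw [pvFdu, if_pos (List.mem_cons_self), List.filter_cons, if_neg (by simp), ih]
    · rw [List.filter_cons, if_pos (by simp [hax]), pvFdu, pvFdu]
      by_cases ha : a ∈ seen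
      · rw [if_pos (List.mem_cons_of_mem _ ha), if_pos ha, ih]
      · rw [if_neg (by simp [hax, ha]), if_neg ha,
          pvFdu_congr_seen N' (a :: x :: seen) (x :: a :: seen) (fun b => by simp; tauto), ih]

theorem pvKeepOn_append_singleton (S : List Char) (x : Char) (hx : x ∈ S) : ∀ (M : List Char),
    pvKeepOn S (M ++ [x]) = pvKeepOn S (M.filter (· ≠ x)) ++ [x] := by
  intro M
  induction M with
  | nil =>
    simp only [List.nil_append, List.filter_nil, pvKeepOn]
    rw [if_neg (by simp)]
  | cons y M' ih =>
    by_cases hy : y = x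
    · subst hy
      simp only [List.cons_append, pvKeepOn, List.filter_cons]
      rw [if_pos ⟨hx, by simp⟩, if_neg (by simp), ih]
    · have e1 : (y ∈ S ∧ y ∈ M' ++ [x]) ↔ (y ∈ S ∧ y ∈ M') := by simp [hy]
      have e2 : (y ∈ S ∧ y ∈ M'.filter (· ≠ x)) ↔ (y ∈ S ∧ y ∈ M') := by
        simp [List.mem_filter, hy]
      simp only [List.cons_append, pvKeepOn, List.filter_cons]
      rw [if_pos (show (decide (y ≠ x)) = true by simp [hy])]
      simp only [pvKeepOn]
      by_cases h : y ∈ S ∧ y ∈ M'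
      · rw [if_pos (e1.mpr h), if_pos (e2.mpr h), ih]
      · rw [if_neg (fun hh => h (e1.mp hh)), if_neg (fun hh => h (e2.mp hh)), ih,
          List.cons_append]

theorem pvFdu_keepOn : ∀ (n : Nat) (N S : List Char), N.length ≤ n → (∀ a ∈ N, a ∈ S) →
    pvFdu [] N = (pvKeepOn S N.reverse).reverse := by
  intro n
  induction n with
  | zero =>
    intro N S hlen _
    have : N = [] := List.eq_nil_of_length_eq_zero (Nat.le_zero.mp hlen)
    subst this; rfl
  | succ m ih =>
    intro N S hlen hsub
    match N with
    | [] => rfl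
    | x :: N' =>
      rw [pvFdu, if_neg (by simp), pvFdu_seen_filter]
      have hx : x ∈ S := hsub x List.mem_cons_self
      rw [ih (N'.filter (· ≠ x)) S
        (Nat.le_trans (List.length_filter_le _ _) (by simpa using hlen))
        (fun a ha => hsub a (List.mem_cons_of_mem _ (List.mem_of_mem_filter ha)))]
      rw [List.reverse_cons, pvKeepOn_append_singleton S x hx, List.reverse_append,
        List.filter_reverse]
      rfl

-- first occurrences with the lowercase test inline (Source B's loop)
def pvFduP : List Char → List Char → List Char
  | _, [] => []
  | seen, x :: xs => if isBetween_az x ∧ x ∉ seen then x :: pvFduP (x :: seen) xs else pvFduP seen xs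

theorem pvBfold_snd : ∀ (ys : List Char) (S : PySem.Set Char) (vals seen : List Char),
    (∀ a, a ∈ S ↔ a ∈ seen) →
    (ys.foldl pvBStep (S, vals)).2 = vals ++ pvFduP seen ys := by
  intro ys
  induction ys with
  | nil => intro S vals seen _; simp [pvFduP]
  | cons x ys ih =>
    intro S vals seen h
    rw [List.foldl_cons, pvFduP]
    by_cases hc : isBetween_az x ∧ x ∉ seen
    · have hnotS : x ∉ S := fun hm => hc.2 ((h x).mp hm)
      have hcond : (isBetween_az x && !(PySem.Set.contains S x)) = true := by
        simp [PySem.Set.contains, hc.1, hnotS]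
      rw [if_pos hc]
      have hstep : pvBStep (S, vals) x = (PySem.Set.add S x, vals ++ [x]) := by
        simp only [pvBStep]; rw [if_pos hcond]
      rw [hstep, ih (PySem.Set.add S x) (vals ++ [x]) (x :: seen) (fun a => by
        rw [PySem.Set.mem_add]
        constructor
        · rintro (h1 | rfl)
          · exact List.mem_cons_of_mem _ ((h a).mp h1)
          · exact List.mem_cons_self
        · intro hm
          rcases List.mem_cons.mp hm with rfl | h1
          · exact Or.inr rfl
          · exact Or.inl ((h a).mpr h1))]
      simp
    · have hcond : (isBetween_az x && !(PySem.Set.contains S x)) = false := by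
        by_cases hp : isBetween_az x
        · have hxseen : x ∈ seen := by
            by_contra hns; exact hc ⟨hp, hns⟩
          simp [PySem.Set.contains, hp, (h x).mpr hxseen]
        · have hfalse : isBetween_az x = false := by simpa using hp
          simp [hfalse]
      rw [if_neg hc]
      have hstep : pvBStep (S, vals) x = (S, vals) := by
        simp only [pvBStep]; rw [if_neg (by simp only [hcond]; decide)]
      rw [hstep]
      exact ih S vals seen h

theorem pvFduP_eq_fdu_filter : ∀ (N seen : List Char),
    pvFduP seen N = pvFdu seen (N.filter isBetween_az) := by
  intro N
  induction N with
  | nil => intro _; rfl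
  | cons x N' ih =>
    intro seen
    rw [pvFduP, List.filter_cons]
    by_cases hp : isBetween_az x
    · rw [if_pos hp, pvFdu]
      by_cases hs : x ∈ seen
      · rw [if_neg (by tauto), if_pos hs, ih]
      · rw [if_pos ⟨hp, hs⟩, if_neg hs, ih]
    · rw [if_neg (by tauto), if_neg (by simpa using hp), ih]

-- ===== VERDICT (by name: the statement is the Claim_ definition above) =====
theorem creaAccoppiamenti_spec : Claim_equal_creaAccoppiamenti := by
  intro chiave _
  unfold Spec_creaAccoppiamenti creaAccoppiamenti creaAccoppiamenti_alt
  have hA1 : pvWhileA chiave.toList [] 0 =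
      (chiave.toList.filter isBetween_az,
       (chiave.toList.filter isBetween_az).foldl pvStepC []) := by
    simpa using pvWhileA_spec chiave.toList [] []
  set L := chiave.toList.filter isBetween_az with hL
  set D := L.foldl pvStepC [] with hD
  have hmemD : ∀ a ∈ L, a ∈ D := fun a ha => (pvMem_foldl_stepC L [] a).mpr (Or.inr ha)
  have hDsub : ∀ c ∈ D, c ∈ L := by
    intro c hc
    rcases (pvMem_foldl_stepC L [] c).mp hc with h | h
    · cases h
    · exact h
  have hcount : ∀ c ∈ D, chiave.toList.count c = L.count c := by
    intro c hc
    have hp : isBetween_az c = true := (List.mem_filter.mp (hDsub c hc)).2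
    exact (List.count_filter hp).symm
  have hphase2 :
      D.foldl (fun dis c => pvRemoveTimes (PySem.List.count chiave.toList c - 1) c dis) L
        = pvKeepOn D L := by
    have hcongr := PySem.List.foldl_congr_mem (l := D) (init := L)
      (f := fun dis c => pvRemoveTimes (PySem.List.count chiave.toList c - 1) c dis)
      (g := fun M c => pvRemoveTimes (L.count c - 1) c M)
      (fun acc c hcmem => by simp only [PySem.List.count_eq]; rw [hcount c hcmem])
    calc D.foldl (fun dis c => pvRemoveTimes (PySem.List.count chiave.toList c - 1) c dis) L
        = D.foldl (fun M c => pvRemoveTimes (L.count c - 1) c M) L := hcongr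
      _ = D.foldl (fun M c => pvRemoveTimes (L.count c - 1) c M) (pvKeepOn [] L) := by
          rw [pvKeepOn_nil_left]
      _ = pvKeepOn ([] ++ D) L :=
          pvPhase2_fold L D [] (pvNodup_foldl_stepC L [] List.nodup_nil) (by simp)
      _ = pvKeepOn D L := by rw [List.nil_append]
  have hB : (chiave.toList.reverse.foldl pvBStep (PySem.Set.empty, [])).2.reverse
      = pvKeepOn D L := by
    have h0 : (chiave.toList.reverse.foldl pvBStep (PySem.Set.empty, [])).2
        = pvFduP [] chiave.toList.reverse := by
      simpa using pvBfold_snd chiave.toList.reverse PySem.Set.empty [] []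
        (fun a => by simp [PySem.Set.empty])
    rw [h0, pvFduP_eq_fdu_filter, List.filter_reverse, ← hL,
      pvFdu_keepOn L.reverse.length L.reverse D (Nat.le_refl _)
        (fun a ha => hmemD a (List.mem_reverse.mp ha)),
      List.reverse_reverse, List.reverse_reverse]
  simp only [hA1]
  rw [hphase2, hB]
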